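-- pv_equiv track=rewrite | github.com/lkwq007/leetcode-py | 2262-Total-Appeal-of-A-String.py | appealSum
-- ===== SOURCE A (Python) =====
-- def appealSum(s: str) -> int:
--     record={}
--     ret,last=0,0
--     for i,item in enumerate(s):
--         last+=i-record.get(item,-1)
--         ret+=last
--         record[item]=i
--     return ret
-- ===== SOURCE B (Python) =====
-- def appealSum(s: str) -> int:
--     # Inclusion-exclusion per character: substrings containing c = all substrings
--     # minus substrings lying entirely inside the gaps between occurrences of c.
--     n = len(s)
--     total = n * (n + 1) // 2
--     pos = {}
--     for i, c in enumerate(s):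
--         pos.setdefault(c, []).append(i)
--     res = 0
--     for ps in pos.values():
--         absent = 0
--         prev = -1
--         for p in ps:
--             g = p - prev - 1
--             absent += g * (g + 1) // 2
--             prev = p
--         g = n - prev - 1
--         absent += g * (g + 1) // 2
--         res += total - absent
--     return res
-- ===== Notes on version B (the rewrite author's own statement) =====
-- stated objective: alternative
-- what changed: B replaces A's single pass with a running accumulator of the appeal of substrings ending at the current index by per-character inclusion-exclusion: it first groups each character's occurrence positions into a dict, then counts the substrings containing each character as total substrings minus the substrings lying inside the gaps between its occurrences (g*(g+1)//2 per gap).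
import Mathlib
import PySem

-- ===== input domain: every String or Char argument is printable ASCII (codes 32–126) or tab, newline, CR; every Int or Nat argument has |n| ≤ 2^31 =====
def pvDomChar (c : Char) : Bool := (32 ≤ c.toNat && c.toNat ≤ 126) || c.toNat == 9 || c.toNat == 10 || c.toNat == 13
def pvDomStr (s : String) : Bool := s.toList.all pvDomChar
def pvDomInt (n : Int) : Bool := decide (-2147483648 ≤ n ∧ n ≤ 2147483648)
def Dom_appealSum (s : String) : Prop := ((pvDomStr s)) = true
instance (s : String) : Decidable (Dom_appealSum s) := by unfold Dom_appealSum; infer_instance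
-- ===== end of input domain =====

-- B replaces A's one-pass running accumulator by per-character inclusion–exclusion: it groups the
-- occurrence positions of each character, and counts substrings containing the character as
-- (all substrings) − (substrings inside the gaps between occurrences); alternative algorithm, same O(n) cost.

-- ===== PORT A =====
-- A's loop over enumerate(s) carrying (ret, last, record)
def appealSumGo (l : List Char) (i ret last : Int) (d : PySem.Dict Char Int) : Int :=
  match l with
  | [] => ret
  | c :: rest =>
    let last' := last + (i - d.getD c (-1))
    appealSumGo rest (i + 1) (ret + last') last' (d.insert c i)

def appealSum (s : String) : Int :=
  appealSumGo s.toList 0 0 0 PySem.Dict.empty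

-- ===== PORT B =====
-- first loop: pos.setdefault(c, []).append(i)  ==  pos[c] = pos.get(c, []) + [i]  ==  Dict.modify c [] (· ++ [i])
def appealBuildPos (l : List Char) (i : Int) (d : PySem.Dict Char (List Int)) :
    PySem.Dict Char (List Int) :=
  match l with
  | [] => d
  | c :: rest => appealBuildPos rest (i + 1) (d.modify c [] (fun ps => ps ++ [i]))

-- inner loop over one character's positions carrying (prev, absent); the [] case adds the final gap
def appealAbsentGo (ps : List Int) (n prev absent : Int) : Int :=
  match ps with
  | [] =>
    let g := n - prev - 1
    absent + PySem.Int.floordiv (g * (g + 1)) 2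
  | p :: rest =>
    let g := p - prev - 1
    appealAbsentGo rest n p (absent + PySem.Int.floordiv (g * (g + 1)) 2)

def appealSum_alt (s : String) : Int :=
  let l := s.toList
  let n : Int := (l.length : Int)
  let total := PySem.Int.floordiv (n * (n + 1)) 2
  let pos := appealBuildPos l 0 PySem.Dict.empty
  pos.values.foldl (fun res ps => res + (total - appealAbsentGo ps n (-1) 0)) 0

-- ===== PRECONDITION & SPEC =====
def Spec_appealSum (s : String) (out : Int) : Prop := out = appealSum_alt s
instance (s : String) (out : Int) : Decidable (Spec_appealSum s out) := by unfold Spec_appealSum; infer_instance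

-- ===== CLAIM (what is proved, stated in full; the proofs are below) =====
def Claim_equal_appealSum : Prop := ∀ (s : String), Dom_appealSum s → Spec_appealSum s (appealSum s)

-- ===== LEMMAS AND PROOFS =====

-- T g = g*(g+1)//2, the number of substrings of a block of length g (exact: g*(g+1) is even)
def pvT (g : Int) : Int := PySem.Int.floordiv (g * (g + 1)) 2

-- per-character "first occurrence" contribution sum: Σ (p_j - p_{j-1})*(n - p_j)
def pvF (ps : List Int) (prev n : Int) : Int :=
  match ps with
  | [] => 0
  | p :: rest => (p - prev) * (n - p) + pvF rest p n

-- per-character absent count: Σ over the gaps (including the final one) of T(gap)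
def pvG (ps : List Int) (prev n : Int) : Int :=
  match ps with
  | [] => pvT (n - prev - 1)
  | p :: rest => pvT (p - prev - 1) + pvG rest p n

def pvLast (ps : List Int) (dflt : Int) : Int :=
  match ps with
  | [] => dflt
  | p :: rest => pvLast rest p

-- sum of per-character contributions over a positions dict
def pvS (D : PySem.Dict Char (List Int)) (n : Int) : Int :=
  (D.values.map (fun ps => pvF ps (-1) n)).sum

-- pointwise form of A's loop: Σ (i - last_occurrence) * (n - i)
def pvP (l : List Char) (n i res : Int) (d : PySem.Dict Char Int) : Int :=
  match l with
  | [] => res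
  | c :: rest => pvP rest n (i + 1) (res + (i - d.getD c (-1)) * (n - i)) (d.insert c i)

theorem pvT_two (g : Int) : 2 * pvT g = g * (g + 1) := by
  unfold pvT
  rw [PySem.Int.floordiv_eq_ediv_of_pos (by norm_num)]
  obtain ⟨k, hk⟩ := Int.even_mul_succ_self g
  omega

theorem pvT_add (a b : Int) : a * b + pvT (a - 1) + pvT (b - 1) = pvT (a + b - 1) := by
  apply mul_left_cancel₀ (a := (2 : Int)) (by norm_num)
  rw [mul_add, mul_add, pvT_two, pvT_two, pvT_two]
  ring

theorem pvF_add_pvG (ps : List Int) (prev n : Int) :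
    pvF ps prev n + pvG ps prev n = pvT (n - prev - 1) := by
  induction ps generalizing prev with
  | nil => simp [pvF, pvG]
  | cons p rest ih =>
    simp only [pvF, pvG]
    have h := pvT_add (p - prev) (n - p)
    have h2 : p - prev + (n - p) = n - prev := by ring
    rw [h2] at h
    have h3 := ih p
    linarith

theorem absentGo_eq (ps : List Int) (n prev absent : Int) :
    appealAbsentGo ps n prev absent = absent + pvG ps prev n := by
  induction ps generalizing prev absent with
  | nil => simp [appealAbsentGo, pvG, pvT]
  | cons p rest ih => simp only [appealAbsentGo, pvG, pvT]; rw [ih]; ring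

theorem pvF_snoc (ps : List Int) (prev n p : Int) :
    pvF (ps ++ [p]) prev n = pvF ps prev n + (p - pvLast ps prev) * (n - p) := by
  induction ps generalizing prev with
  | nil => simp [pvF, pvLast]
  | cons q rest ih => simp only [List.cons_append, pvF, pvLast]; rw [ih]; ring

theorem pvLast_snoc (ps : List Int) (dflt p : Int) : pvLast (ps ++ [p]) dflt = p := by
  induction ps generalizing dflt with
  | nil => rfl
  | cons q rest ih => simpa [pvLast] using ih q

-- sum over the values of a nodup-keyed items list, after replacing the entry at key c
theorem sum_values_replace (n : Int) (c : Char) (v : List Int) :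
    ∀ (its : List (Char × List Int)), (its.map Prod.fst).Nodup →
    (PySem.Dict.mk its).contains c = true →
    ((its.map (fun p => if p.1 == c then (c, v) else p)).map
        (fun p => pvF p.2 (-1) n)).sum
      = (its.map (fun p => pvF p.2 (-1) n)).sum
          - pvF ((PySem.Dict.mk its).getD c []) (-1) n + pvF v (-1) n := by
  intro its
  induction its with
  | nil => intro _ hc; simp [PySem.Dict.contains] at hc
  | cons kv rest ih =>
    intro hnd hc
    obtain ⟨k, w⟩ := kv
    by_cases hk : k = c
    · subst hk
      have hrest : ∀ p ∈ rest, (p.1 == k) = false := by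
        intro p hp
        rw [List.map_cons, List.nodup_cons] at hnd
        have : p.1 ∈ rest.map Prod.fst := List.mem_map_of_mem hp
        simp only [beq_eq_false_iff_ne, ne_eq]
        intro he; exact hnd.1 (he ▸ this)
      have hmap : rest.map (fun p => if p.1 == k then (k, v) else p) = rest := by
        conv_rhs => rw [← List.map_id rest]
        apply List.map_congr_left
        intro p hp; simp [hrest p hp]
      have hget : (PySem.Dict.mk ((k, w) :: rest)).getD k [] = w := by
        rw [PySem.Dict.getD_eq_get?_getD, PySem.Dict.get?_mk_cons]; simp
      rw [hget]
      simp only [List.map_cons, BEq.rfl, if_pos, List.sum_cons, hmap]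
      ring
    · have hget : (PySem.Dict.mk ((k, w) :: rest)).getD c [] = (PySem.Dict.mk rest).getD c [] := by
        rw [PySem.Dict.getD_eq_get?_getD, PySem.Dict.get?_mk_cons,
            if_neg (by simpa using hk), PySem.Dict.getD_eq_get?_getD]
      have hc' : (PySem.Dict.mk rest).contains c = true := by
        simpa [PySem.Dict.contains, hk] using hc
      have hnd' : (rest.map Prod.fst).Nodup := by
        rw [List.map_cons, List.nodup_cons] at hnd
        exact hnd.2
      have hkc : (k == c) = false := by simpa using hk
      simp only [List.map_cons, hkc, if_neg, Bool.false_eq_true, not_false_iff, List.sum_cons, hget]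
      rw [ih hnd' hc']
      ring

theorem pvS_modify (D : PySem.Dict Char (List Int)) (hnd : D.keys.Nodup) (c : Char) (i n : Int) :
    pvS (D.modify c [] (fun ps => ps ++ [i])) n
      = pvS D n + (i - pvLast (D.getD c []) (-1)) * (n - i) := by
  show pvS (D.insert c (D.getD c [] ++ [i])) n = _
  by_cases hc : D.contains c = true
  · unfold pvS PySem.Dict.values
    rw [PySem.Dict.items_insert_of_contains D _ hc]
    obtain ⟨its⟩ := D
    have hkeys : (its.map Prod.fst).Nodup := by
      simpa [PySem.Dict.keys] using hnd
    have := sum_values_replace n c ((PySem.Dict.mk its).getD c [] ++ [i]) its hkeys hc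
    simp only [List.map_map, Function.comp_def] at this ⊢
    rw [this, pvF_snoc]
    ring
  · have hc' : D.contains c = false := by simpa using hc
    have hget : D.getD c [] = [] := PySem.Dict.getD_of_not_contains D [] hc'
    unfold pvS PySem.Dict.values
    rw [PySem.Dict.items_insert_of_not_contains D _ hc', hget]
    simp [pvF, pvLast]

-- accumulator lemma for the pointwise form
theorem pvP_acc (l : List Char) (n i res : Int) (d : PySem.Dict Char Int) :
    pvP l n i res d = res + pvP l n i 0 d := by
  induction l generalizing i res d with
  | nil => simp [pvP]
  | cons c rest ih =>
    simp only [pvP]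
    rw [ih, ih (res := 0 + _)]
    ring

-- A's loop equals the pointwise form
theorem go_eq_pvP (l : List Char) (i ret last : Int) (d : PySem.Dict Char Int) :
    appealSumGo l i ret last d
      = ret + last * l.length + pvP l (i + l.length) i 0 d := by
  induction l generalizing i ret last d with
  | nil => simp [appealSumGo, pvP]
  | cons c rest ih =>
    simp only [appealSumGo, pvP]
    rw [ih]
    have hlen : ((c :: rest).length : Int) = (rest.length : Int) + 1 := by
      push_cast [List.length_cons]; ring
    rw [hlen]
    have h2 : i + ((rest.length : Int) + 1) = (i + 1) + (rest.length : Int) := by ring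
    rw [h2]
    conv_rhs => rw [pvP_acc]
    ring

-- main invariant: the pointwise sum plus the contributions collected so far equals the
-- contributions of the final positions dict
theorem pvP_eq_pvS (n : Int) (l : List Char) :
    ∀ (i : Int) (D : PySem.Dict Char (List Int)) (d : PySem.Dict Char Int),
    D.keys.Nodup →
    (∀ c, d.getD c (-1) = pvLast (D.getD c []) (-1)) →
    pvP l n i 0 d + pvS D n = pvS (appealBuildPos l i D) n := by
  induction l with
  | nil => intro i D d _ _; simp [pvP, appealBuildPos]
  | cons c rest ih =>
    intro i D d hnd hrel
    simp only [pvP, appealBuildPos]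
    rw [pvP_acc]
    have hS := pvS_modify D hnd c i n
    have hnd' : (D.modify c [] (fun ps => ps ++ [i])).keys.Nodup :=
      PySem.Dict.nodup_keys_insert D c _ hnd
    have hrel' : ∀ c', (d.insert c i).getD c' (-1)
        = pvLast ((D.modify c [] (fun ps => ps ++ [i])).getD c' []) (-1) := by
      intro c'
      show (d.insert c i).getD c' (-1)
        = pvLast ((D.insert c (D.getD c [] ++ [i])).getD c' []) (-1)
      rw [PySem.Dict.getD_insert, PySem.Dict.getD_insert]
      by_cases h : c' = c
      · simp [h, pvLast_snoc]
      · simp [h, hrel c']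
    have := ih (i + 1) (D.modify c [] (fun ps => ps ++ [i])) (d.insert c i) hnd' hrel'
    rw [hrel c] at *
    linarith

-- ===== VERDICT (by name: the statement is the Claim_ definition above) =====
theorem appealSum_spec : Claim_equal_appealSum := by
  intro s _
  unfold Spec_appealSum appealSum appealSum_alt
  set l := s.toList with hl
  set n : Int := (l.length : Int) with hn
  -- A's side: pointwise form, then the positions-dict sum
  rw [go_eq_pvP]
  have hA : (0 : Int) + 0 * (l.length : Int) + pvP l (0 + (l.length : Int)) 0 0 PySem.Dict.empty
      = pvS (appealBuildPos l 0 PySem.Dict.empty) n := by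
    have hrel : ∀ c, (PySem.Dict.empty : PySem.Dict Char Int).getD c (-1)
        = pvLast ((PySem.Dict.empty : PySem.Dict Char (List Int)).getD c []) (-1) := by
      intro c; simp [PySem.Dict.getD_empty, pvLast]
    have := pvP_eq_pvS n l 0 PySem.Dict.empty PySem.Dict.empty
      PySem.Dict.nodup_keys_empty hrel
    have hSe : pvS (PySem.Dict.empty : PySem.Dict Char (List Int)) n = 0 := by
      simp [pvS, PySem.Dict.values, PySem.Dict.empty]
    rw [hSe] at this
    simpa using this
  rw [hA]
  -- B's side: the fold over values is the same sum
  rw [PySem.List.foldl_add]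
  have hmap : ∀ ps : List Int,
      PySem.Int.floordiv (n * (n + 1)) 2 - appealAbsentGo ps n (-1) 0 = pvF ps (-1) n := by
    intro ps
    rw [absentGo_eq]
    have h := pvF_add_pvG ps (-1) n
    have h2 : n - (-1) - 1 = n := by ring
    rw [h2] at h
    have : pvT n = PySem.Int.floordiv (n * (n + 1)) 2 := rfl
    linarith
  unfold pvS
  rw [List.map_congr_left (fun ps _ => hmap ps)]
  simp
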